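-- pv_equiv track=rewrite | github.com/aimin-tang/comp_programming | usaco/2022/dice.py | compare_dice
-- ===== SOURCE A (Python) =====
-- def compare_dice(d1, d2):
--     # see if d1 beats d2
--     result = 0
--     for n1 in d1:
--         for n2 in d2:
--             if n1 > n2:
--                 result += 1
--             elif n1 < n2:
--                 result -= 1
--             else:
--                 # tie
--                 continue
--
--     return result
-- ===== SOURCE B (Python) =====
-- def _prefix_len(s, pred):
--     # length of the longest prefix of sorted list s whose elements satisfy pred
--     # (pred is downward-closed), found by binary search
--     lo, hi = 0, len(s)
--     while lo < hi:
--         mid = (lo + hi) // 2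
--         if pred(s[mid]):
--             lo = mid + 1
--         else:
--             hi = mid
--     return lo
--
--
-- def compare_dice(d1, d2):
--     # sort d2 once; for each face of d1, binary-search how many d2 faces
--     # are smaller and how many are larger
--     s = sorted(d2)
--     m = len(s)
--     res = 0
--     for n1 in d1:
--         lt = _prefix_len(s, lambda v: v < n1)
--         le = _prefix_len(s, lambda v: v <= n1)
--         res += lt - (m - le)
--     return res
-- ===== Notes on version B (the rewrite author's own statement) =====
-- stated objective: faster
-- what changed: Instead of comparing every pair of faces in two nested loops, B sorts d2 once and binary-searches it per face of d1 to count smaller and larger faces directly.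
import Mathlib
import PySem

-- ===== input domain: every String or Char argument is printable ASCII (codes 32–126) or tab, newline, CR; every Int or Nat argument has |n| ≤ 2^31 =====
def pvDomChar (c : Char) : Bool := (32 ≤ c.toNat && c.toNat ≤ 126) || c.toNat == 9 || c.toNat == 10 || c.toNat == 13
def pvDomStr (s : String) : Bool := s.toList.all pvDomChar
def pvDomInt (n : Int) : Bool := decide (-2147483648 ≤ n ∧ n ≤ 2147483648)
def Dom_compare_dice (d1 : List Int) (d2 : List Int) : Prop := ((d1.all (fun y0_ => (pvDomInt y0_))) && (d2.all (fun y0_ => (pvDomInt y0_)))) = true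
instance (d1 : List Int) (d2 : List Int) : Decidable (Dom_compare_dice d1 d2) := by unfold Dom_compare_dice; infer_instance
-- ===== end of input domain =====

-- B replaces A's all-pairs double loop by sorting d2 once and binary-searching it
-- per face of d1 (objective: faster, O((n+m) log m) instead of O(n*m)).

-- ===== PORT A =====
-- nested for-loops: for n1 in d1: for n2 in d2: result ±= 1 on strict comparison
def compare_dice (d1 : List Int) (d2 : List Int) : Int :=
  d1.foldl (fun result n1 =>
    d2.foldl (fun result n2 =>
      if n1 > n2 then result + 1
      else if n1 < n2 then result - 1
      else result) result) 0

-- ===== PORT B =====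
-- _prefix_len: binary search for the longest pred-satisfying prefix of s
-- (s[mid] is in range whenever lo < hi ≤ len s, ported as getD with default 0)
def prefixLen (s : List Int) (pred : Int → Bool) (lo hi : Nat) : Nat :=
  if lo < hi then
    let mid := (lo + hi) / 2
    if pred (s.getD mid 0) then prefixLen s pred (mid + 1) hi
    else prefixLen s pred lo mid
  else lo
termination_by hi - lo
decreasing_by all_goals omega

def compare_dice_alt (d1 : List Int) (d2 : List Int) : Int :=
  let s := PySem.List.sorted d2 (fun v => v) false
  let m := s.length
  d1.foldl (fun res n1 =>
    let lt := prefixLen s (fun v => decide (v < n1)) 0 m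
    let le := prefixLen s (fun v => decide (v ≤ n1)) 0 m
    res + ((lt : Int) - ((m - le : Nat) : Int))) 0

-- ===== PRECONDITION & SPEC =====
def Spec_compare_dice (d1 : List Int) (d2 : List Int) (out : Int) : Prop := out = compare_dice_alt d1 d2
instance (d1 : List Int) (d2 : List Int) (out : Int) : Decidable (Spec_compare_dice d1 d2 out) := by unfold Spec_compare_dice; infer_instance

-- ===== CLAIM (what is proved, stated in full; the proofs are below) =====
def Claim_equal_compare_dice : Prop := ∀ (d1 : List Int) (d2 : List Int), Dom_compare_dice d1 d2 → Spec_compare_dice d1 d2 (compare_dice d1 d2)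

-- ===== LEMMAS AND PROOFS =====

-- In a sorted list, a downward-closed predicate holds exactly on the prefix of
-- length countP pred.
theorem countP_prefix_char (p : Int → Bool)
    (hmono : ∀ a b : Int, a ≤ b → p b = true → p a = true) :
    ∀ (s : List Int), s.Pairwise (· ≤ ·) →
      ∀ i, i < s.length → (p (s.getD i 0) = true ↔ i < s.countP p) := by
  intro s
  induction s with
  | nil => intro _ i hi; simp at hi
  | cons a t ih =>
    intro hs i hi
    have ha : ∀ b ∈ t, a ≤ b := fun b hb => List.rel_of_pairwise_cons hs hb
    have ht : t.Pairwise (· ≤ ·) := hs.of_cons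
    by_cases hpa : p a = true
    · cases i with
      | zero => simp [hpa]
      | succ j =>
        have hj : j < t.length := by simpa using hi
        have hch := ih ht j hj
        simp only [List.getD_cons_succ, List.countP_cons, if_pos hpa]
        rw [hch]; omega
    · have hpt : t.countP p = 0 := by
        rw [List.countP_eq_zero]
        intro b hb hpb
        exact hpa (hmono a b (ha b hb) hpb)
      cases i with
      | zero => simp [hpa, hpt]
      | succ j =>
        have hj : j < t.length := by simpa using hi
        have hmem : t.getD j 0 ∈ t := by
          rw [List.getD_eq_getElem t 0 hj]; exact List.getElem_mem hj
        simp only [List.getD_cons_succ, List.countP_cons, if_neg hpa, hpt]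
        constructor
        · intro h; exact absurd (hmono a _ (ha _ hmem) h) hpa
        · omega

-- The binary-search loop returns the prefix length k, given the prefix
-- characterisation and bracketing invariants lo ≤ k ≤ hi ≤ |s|.
theorem prefixLen_eq (s : List Int) (p : Int → Bool) (k : Nat)
    (hk : ∀ i, i < s.length → (p (s.getD i 0) = true ↔ i < k)) :
    ∀ (n lo hi : Nat), hi - lo ≤ n → hi ≤ s.length → lo ≤ k → k ≤ hi →
      prefixLen s p lo hi = k := by
  intro n
  induction n with
  | zero =>
    intro lo hi hfuel hlen hlo hhi
    rw [prefixLen]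
    have : ¬ lo < hi := by omega
    rw [if_neg this]; omega
  | succ n ih =>
    intro lo hi hfuel hlen hlo hhi
    rw [prefixLen]
    by_cases hlh : lo < hi
    · rw [if_pos hlh]
      have hmid : (lo + hi) / 2 < s.length := by omega
      have hchar := hk ((lo + hi) / 2) hmid
      by_cases hp : p (s.getD ((lo + hi) / 2) 0) = true
      · rw [if_pos hp]
        have : (lo + hi) / 2 < k := hchar.mp hp
        exact ih ((lo + hi) / 2 + 1) hi (by omega) hlen (by omega) hhi
      · rw [if_neg hp]
        have : ¬ (lo + hi) / 2 < k := fun h => hp (hchar.mpr h)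
        exact ih lo ((lo + hi) / 2) (by omega) (by omega) hlo (by omega)
    · rw [if_neg hlh]; omega

-- A's inner loop over d2 adds (#{n2 < n1}) − (#{n2 > n1}) to the accumulator.
theorem innerA (n1 : Int) :
    ∀ (d2 : List Int) (r : Int),
      d2.foldl (fun result n2 =>
        if n1 > n2 then result + 1
        else if n1 < n2 then result - 1
        else result) r
      = r + ((d2.countP (fun n2 => decide (n2 < n1)) : Int)
             - (d2.countP (fun n2 => decide (n1 < n2)) : Int)) := by
  intro d2
  induction d2 with
  | nil => intro r; simp
  | cons a t ih =>
    intro r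
    simp only [List.foldl_cons, List.countP_cons, ih]
    by_cases h1 : a < n1
    · have h2 : ¬ n1 < a := by omega
      simp [h1, h2]
      ring
    · by_cases h2 : n1 < a
      · simp [h1, h2]
        ring
      · simp [h1, h2]

theorem compare_dice_spec : Claim_equal_compare_dice := by
  unfold Claim_equal_compare_dice Spec_compare_dice
  intro d1 d2 hdom
  clear hdom
  have hperm : (PySem.List.sorted d2 (fun v => v) false).Perm d2 :=
    PySem.List.sorted_perm d2 (fun v => v) false
  have hsorted : (PySem.List.sorted d2 (fun v => v) false).Pairwise (· ≤ ·) :=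
    PySem.List.sorted_pairwise d2 (fun v => v)
  set s := PySem.List.sorted d2 (fun v => v) false with hs
  have hB : compare_dice_alt d1 d2
      = d1.foldl (fun res n1 =>
          res + ((prefixLen s (fun v => decide (v < n1)) 0 s.length : Int)
                 - ((s.length - prefixLen s (fun v => decide (v ≤ n1)) 0 s.length : Nat) : Int))) 0 := rfl
  have hA : compare_dice d1 d2
      = d1.foldl (fun result n1 => d2.foldl (fun result n2 =>
          if n1 > n2 then result + 1
          else if n1 < n2 then result - 1
          else result) result) 0 := rfl
  rw [hA, hB]
  clear hA hB
  -- per-face value of A's inner loop over s equals B's binary-search expression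
  have hstep : ∀ (r : Int) (n1 : Int),
      (d2.foldl (fun result n2 =>
        if n1 > n2 then result + 1
        else if n1 < n2 then result - 1
        else result) r : Int)
      = r + ((prefixLen s (fun v => decide (v < n1)) 0 s.length : Int)
             - ((s.length - prefixLen s (fun v => decide (v ≤ n1)) 0 s.length : Nat) : Int)) := by
    intro r n1
    have hlt : prefixLen s (fun v => decide (v < n1)) 0 s.length
        = s.countP (fun v => decide (v < n1)) :=
      prefixLen_eq s (fun v => decide (v < n1)) _
        (countP_prefix_char (fun v => decide (v < n1))
          (fun a b hab hb => by
            simp only [decide_eq_true_eq] at hb ⊢; omega) s hsorted)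
        s.length 0 s.length (by omega) le_rfl (Nat.zero_le _) List.countP_le_length
    have hle : prefixLen s (fun v => decide (v ≤ n1)) 0 s.length
        = s.countP (fun v => decide (v ≤ n1)) :=
      prefixLen_eq s (fun v => decide (v ≤ n1)) _
        (countP_prefix_char (fun v => decide (v ≤ n1))
          (fun a b hab hb => by
            simp only [decide_eq_true_eq] at hb ⊢; omega) s hsorted)
        s.length 0 s.length (by omega) le_rfl (Nat.zero_le _) List.countP_le_length
    have hsplit : s.countP (fun v => decide (v ≤ n1)) + s.countP (fun v => decide (n1 < v))
        = s.length := by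
      have h0 := List.length_eq_countP_add_countP (l := s) (p := fun v => decide (v ≤ n1))
      have hneg : s.countP (fun a => decide ¬(decide (a ≤ n1) = true))
          = s.countP (fun v => decide (n1 < v)) := by
        apply List.countP_congr
        intro v _
        by_cases h : v ≤ n1
        · simp [h]
        · simp [h]; omega
      rw [hneg] at h0
      omega
    rw [innerA n1 d2 r,
      show List.countP (fun n2 => decide (n2 < n1)) d2
        = List.countP (fun v => decide (v < n1)) s from (List.Perm.countP_eq _ hperm).symm,
      show List.countP (fun n2 => decide (n1 < n2)) d2
        = List.countP (fun v => decide (n1 < v)) s from (List.Perm.countP_eq _ hperm).symm,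
      hlt, hle]
    omega
  have hfold : ∀ (l : List Int) (r : Int),
      l.foldl (fun result n1 => d2.foldl (fun result n2 =>
        if n1 > n2 then result + 1
        else if n1 < n2 then result - 1
        else result) result) r
      = l.foldl (fun res n1 =>
          res + ((prefixLen s (fun v => decide (v < n1)) 0 s.length : Int)
                 - ((s.length - prefixLen s (fun v => decide (v ≤ n1)) 0 s.length : Nat) : Int))) r := by
    intro l
    induction l with
    | nil => intro r; rfl
    | cons a t ih => intro r; simp only [List.foldl_cons, hstep r a]; exact ih _
  exact hfold d1 0
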